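-- pv_equiv track=rewrite | github.com/janabadilla-ux/ppc-credit-card | minify.py | rewrite_urls
-- ===== SOURCE A (Python) =====
-- CDN = "https://cdn.jsdelivr.net/gh/janabadilla-ux/ppc-credit-card@main"
--
-- def rewrite_urls(html: str) -> str:
--     repl = {
--         'href="styles.css"': f'href="{CDN}/styles.min.css"',
--         'src="assets/logo.png"': f'src="{CDN}/assets/logo.png"',
--         'src="assets/image1.png"': f'src="{CDN}/assets/image1.png"',
--         'src="assets/image2.jpg"': f'src="{CDN}/assets/image2.jpg"',
--         'src="assets/image3.jpg"': f'src="{CDN}/assets/image3.jpg"',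
--         'content="assets/image1.png"': f'content="{CDN}/assets/image1.png"',
--         '"image": "assets/image1.png"': f'"image": "{CDN}/assets/image1.png"',
--     }
--     for old, new in repl.items():
--         if old in html:
--             html = html.replace(old, new)
--     return html
-- ===== SOURCE B (Python) =====
-- CDN = "https://cdn.jsdelivr.net/gh/janabadilla-ux/ppc-credit-card@main"
--
-- def rewrite_urls(html: str) -> str:
--     # Single left-to-right scan with a replacement table: at each position try the
--     # seven literal patterns in table order; on a hit emit the replacement and jump
--     # past the match, otherwise emit the character. One traversal instead of seven
--     # sequential replace passes.
--     repl = {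
--         'href="styles.css"': f'href="{CDN}/styles.min.css"',
--         'src="assets/logo.png"': f'src="{CDN}/assets/logo.png"',
--         'src="assets/image1.png"': f'src="{CDN}/assets/image1.png"',
--         'src="assets/image2.jpg"': f'src="{CDN}/assets/image2.jpg"',
--         'src="assets/image3.jpg"': f'src="{CDN}/assets/image3.jpg"',
--         'content="assets/image1.png"': f'content="{CDN}/assets/image1.png"',
--         '"image": "assets/image1.png"': f'"image": "{CDN}/assets/image1.png"',
--     }
--     items = list(repl.items())
--     out = []
--     i = 0
--     n = len(html)
--     while i < n:
--         for old, new in items: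
--             if html.startswith(old, i):
--                 out.append(new)
--                 i += len(old)
--                 break
--         else:
--             out.append(html[i])
--             i += 1
--     return "".join(out)
-- ===== Notes on version B (the rewrite author's own statement) =====
-- stated objective: alternative
-- what changed: Replaced A's seven sequential str.replace passes (each rescanning and rebuilding the whole string) by one left-to-right scan that tries the seven literal patterns at each position via a replacement table and emits output in a single traversal.
import Mathlib
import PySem

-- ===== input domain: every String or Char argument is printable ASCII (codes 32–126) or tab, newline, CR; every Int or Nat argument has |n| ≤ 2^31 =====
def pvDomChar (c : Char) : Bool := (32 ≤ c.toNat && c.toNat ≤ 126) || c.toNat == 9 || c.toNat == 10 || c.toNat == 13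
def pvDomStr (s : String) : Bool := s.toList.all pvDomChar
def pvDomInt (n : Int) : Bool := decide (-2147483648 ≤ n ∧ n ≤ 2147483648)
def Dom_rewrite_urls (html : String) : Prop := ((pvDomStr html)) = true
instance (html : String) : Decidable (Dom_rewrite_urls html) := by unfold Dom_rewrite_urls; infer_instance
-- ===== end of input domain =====

-- B replaces A's seven sequential str.replace passes by one left-to-right scan with a
-- table of the seven literal patterns (objective: alternative, same asymptotic cost).

-- ===== PORT A =====
-- A's dict literal (insertion order) as an association list; the f-string constants are folded.
def replA : List (String × String) := [
  ("href=\"styles.css\"", "href=\"https://cdn.jsdelivr.net/gh/janabadilla-ux/ppc-credit-card@main/styles.min.css\""),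
  ("src=\"assets/logo.png\"", "src=\"https://cdn.jsdelivr.net/gh/janabadilla-ux/ppc-credit-card@main/assets/logo.png\""),
  ("src=\"assets/image1.png\"", "src=\"https://cdn.jsdelivr.net/gh/janabadilla-ux/ppc-credit-card@main/assets/image1.png\""),
  ("src=\"assets/image2.jpg\"", "src=\"https://cdn.jsdelivr.net/gh/janabadilla-ux/ppc-credit-card@main/assets/image2.jpg\""),
  ("src=\"assets/image3.jpg\"", "src=\"https://cdn.jsdelivr.net/gh/janabadilla-ux/ppc-credit-card@main/assets/image3.jpg\""),
  ("content=\"assets/image1.png\"", "content=\"https://cdn.jsdelivr.net/gh/janabadilla-ux/ppc-credit-card@main/assets/image1.png\""),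
  ("\"image\": \"assets/image1.png\"", "\"image\": \"https://cdn.jsdelivr.net/gh/janabadilla-ux/ppc-credit-card@main/assets/image1.png\"")
]

def rewrite_urls (html : String) : String :=
  replA.foldl (fun h p => if PySem.Str.isIn p.1 h then PySem.Str.replace h p.1 p.2 else h) html

-- ===== PORT B =====
-- Source B's replacement table, as code-point lists (the scan works on characters).
def pvK1 : List Char := ['h', 'r', 'e', 'f', '=', '"', 's', 't', 'y', 'l', 'e', 's', '.', 'c', 's', 's', '"']
def pvK2 : List Char := ['s', 'r', 'c', '=', '"', 'a', 's', 's', 'e', 't', 's', '/', 'l', 'o', 'g', 'o', '.', 'p', 'n', 'g', '"']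
def pvK3 : List Char := ['s', 'r', 'c', '=', '"', 'a', 's', 's', 'e', 't', 's', '/', 'i', 'm', 'a', 'g', 'e', '1', '.', 'p', 'n', 'g', '"']
def pvK4 : List Char := ['s', 'r', 'c', '=', '"', 'a', 's', 's', 'e', 't', 's', '/', 'i', 'm', 'a', 'g', 'e', '2', '.', 'j', 'p', 'g', '"']
def pvK5 : List Char := ['s', 'r', 'c', '=', '"', 'a', 's', 's', 'e', 't', 's', '/', 'i', 'm', 'a', 'g', 'e', '3', '.', 'j', 'p', 'g', '"']
def pvK6 : List Char := ['c', 'o', 'n', 't', 'e', 'n', 't', '=', '"', 'a', 's', 's', 'e', 't', 's', '/', 'i', 'm', 'a', 'g', 'e', '1', '.', 'p', 'n', 'g', '"']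
def pvK7 : List Char := ['"', 'i', 'm', 'a', 'g', 'e', '"', ':', ' ', '"', 'a', 's', 's', 'e', 't', 's', '/', 'i', 'm', 'a', 'g', 'e', '1', '.', 'p', 'n', 'g', '"']
def pvR1 : List Char := ['h', 'r', 'e', 'f', '=', '"', 'h', 't', 't', 'p', 's', ':', '/', '/', 'c', 'd', 'n', '.', 'j', 's', 'd', 'e', 'l', 'i', 'v', 'r', '.', 'n', 'e', 't', '/', 'g', 'h', '/', 'j', 'a', 'n', 'a', 'b', 'a', 'd', 'i', 'l', 'l', 'a', '-', 'u', 'x', '/', 'p', 'p', 'c', '-', 'c', 'r', 'e', 'd', 'i', 't', '-', 'c', 'a', 'r', 'd', '@', 'm', 'a', 'i', 'n', '/', 's', 't', 'y', 'l', 'e', 's', '.', 'm', 'i', 'n', '.', 'c', 's', 's', '"']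
def pvR2 : List Char := ['s', 'r', 'c', '=', '"', 'h', 't', 't', 'p', 's', ':', '/', '/', 'c', 'd', 'n', '.', 'j', 's', 'd', 'e', 'l', 'i', 'v', 'r', '.', 'n', 'e', 't', '/', 'g', 'h', '/', 'j', 'a', 'n', 'a', 'b', 'a', 'd', 'i', 'l', 'l', 'a', '-', 'u', 'x', '/', 'p', 'p', 'c', '-', 'c', 'r', 'e', 'd', 'i', 't', '-', 'c', 'a', 'r', 'd', '@', 'm', 'a', 'i', 'n', '/', 'a', 's', 's', 'e', 't', 's', '/', 'l', 'o', 'g', 'o', '.', 'p', 'n', 'g', '"']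
def pvR3 : List Char := ['s', 'r', 'c', '=', '"', 'h', 't', 't', 'p', 's', ':', '/', '/', 'c', 'd', 'n', '.', 'j', 's', 'd', 'e', 'l', 'i', 'v', 'r', '.', 'n', 'e', 't', '/', 'g', 'h', '/', 'j', 'a', 'n', 'a', 'b', 'a', 'd', 'i', 'l', 'l', 'a', '-', 'u', 'x', '/', 'p', 'p', 'c', '-', 'c', 'r', 'e', 'd', 'i', 't', '-', 'c', 'a', 'r', 'd', '@', 'm', 'a', 'i', 'n', '/', 'a', 's', 's', 'e', 't', 's', '/', 'i', 'm', 'a', 'g', 'e', '1', '.', 'p', 'n', 'g', '"']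
def pvR4 : List Char := ['s', 'r', 'c', '=', '"', 'h', 't', 't', 'p', 's', ':', '/', '/', 'c', 'd', 'n', '.', 'j', 's', 'd', 'e', 'l', 'i', 'v', 'r', '.', 'n', 'e', 't', '/', 'g', 'h', '/', 'j', 'a', 'n', 'a', 'b', 'a', 'd', 'i', 'l', 'l', 'a', '-', 'u', 'x', '/', 'p', 'p', 'c', '-', 'c', 'r', 'e', 'd', 'i', 't', '-', 'c', 'a', 'r', 'd', '@', 'm', 'a', 'i', 'n', '/', 'a', 's', 's', 'e', 't', 's', '/', 'i', 'm', 'a', 'g', 'e', '2', '.', 'j', 'p', 'g', '"']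
def pvR5 : List Char := ['s', 'r', 'c', '=', '"', 'h', 't', 't', 'p', 's', ':', '/', '/', 'c', 'd', 'n', '.', 'j', 's', 'd', 'e', 'l', 'i', 'v', 'r', '.', 'n', 'e', 't', '/', 'g', 'h', '/', 'j', 'a', 'n', 'a', 'b', 'a', 'd', 'i', 'l', 'l', 'a', '-', 'u', 'x', '/', 'p', 'p', 'c', '-', 'c', 'r', 'e', 'd', 'i', 't', '-', 'c', 'a', 'r', 'd', '@', 'm', 'a', 'i', 'n', '/', 'a', 's', 's', 'e', 't', 's', '/', 'i', 'm', 'a', 'g', 'e', '3', '.', 'j', 'p', 'g', '"']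
def pvR6 : List Char := ['c', 'o', 'n', 't', 'e', 'n', 't', '=', '"', 'h', 't', 't', 'p', 's', ':', '/', '/', 'c', 'd', 'n', '.', 'j', 's', 'd', 'e', 'l', 'i', 'v', 'r', '.', 'n', 'e', 't', '/', 'g', 'h', '/', 'j', 'a', 'n', 'a', 'b', 'a', 'd', 'i', 'l', 'l', 'a', '-', 'u', 'x', '/', 'p', 'p', 'c', '-', 'c', 'r', 'e', 'd', 'i', 't', '-', 'c', 'a', 'r', 'd', '@', 'm', 'a', 'i', 'n', '/', 'a', 's', 's', 'e', 't', 's', '/', 'i', 'm', 'a', 'g', 'e', '1', '.', 'p', 'n', 'g', '"']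
def pvR7 : List Char := ['"', 'i', 'm', 'a', 'g', 'e', '"', ':', ' ', '"', 'h', 't', 't', 'p', 's', ':', '/', '/', 'c', 'd', 'n', '.', 'j', 's', 'd', 'e', 'l', 'i', 'v', 'r', '.', 'n', 'e', 't', '/', 'g', 'h', '/', 'j', 'a', 'n', 'a', 'b', 'a', 'd', 'i', 'l', 'l', 'a', '-', 'u', 'x', '/', 'p', 'p', 'c', '-', 'c', 'r', 'e', 'd', 'i', 't', '-', 'c', 'a', 'r', 'd', '@', 'm', 'a', 'i', 'n', '/', 'a', 's', 's', 'e', 't', 's', '/', 'i', 'm', 'a', 'g', 'e', '1', '.', 'p', 'n', 'g', '"']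

-- Source B's while-loop: at each position try the seven patterns in table order; on a hit
-- emit the replacement and jump past the match, else emit the character and advance.
-- ''.join(out) accumulation is ported as the recursion's concatenation (exact).
def pvScan : List Char → List Char
  | [] => []
  | c :: t =>
    if pvK1.isPrefixOf (c :: t) then pvR1 ++ pvScan (t.drop 16)
    else if pvK2.isPrefixOf (c :: t) then pvR2 ++ pvScan (t.drop 20)
    else if pvK3.isPrefixOf (c :: t) then pvR3 ++ pvScan (t.drop 22)
    else if pvK4.isPrefixOf (c :: t) then pvR4 ++ pvScan (t.drop 22)
    else if pvK5.isPrefixOf (c :: t) then pvR5 ++ pvScan (t.drop 22)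
    else if pvK6.isPrefixOf (c :: t) then pvR6 ++ pvScan (t.drop 26)
    else if pvK7.isPrefixOf (c :: t) then pvR7 ++ pvScan (t.drop 27)
    else c :: pvScan t
termination_by s => s.length
decreasing_by all_goals simp

def rewrite_urls_alt (html : String) : String := String.ofList (pvScan html.toList)

-- ===== PRECONDITION & SPEC =====
-- Pre_ excludes inputs where an occurrence of one of the first six patterns overlaps (sharing its
-- closing quote) an occurrence of the seventh pattern '"image": "assets/image1.png"'; there A's
-- seventh pass accidentally matches across the boundary of an earlier pass's replacement, which no
-- single left-to-right scan reproduces.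
def pvBad : List String := [
  "href=\"styles.css\"image\": \"assets/image1.png\"",
  "src=\"assets/logo.png\"image\": \"assets/image1.png\"",
  "src=\"assets/image1.png\"image\": \"assets/image1.png\"",
  "src=\"assets/image2.jpg\"image\": \"assets/image1.png\"",
  "src=\"assets/image3.jpg\"image\": \"assets/image1.png\"",
  "content=\"assets/image1.png\"image\": \"assets/image1.png\""
]

def Pre_rewrite_urls (html : String) : Prop := ∀ p ∈ pvBad, PySem.Str.isIn p html = false
instance (html : String) : Decidable (Pre_rewrite_urls html) := by unfold Pre_rewrite_urls; infer_instance

def pvWitness_rewrite_urls : String := "<link href=\"styles.css\">"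

def Spec_rewrite_urls (html : String) (out : String) : Prop := out = rewrite_urls_alt html
instance (html : String) (out : String) : Decidable (Spec_rewrite_urls html out) := by unfold Spec_rewrite_urls; infer_instance

-- ===== CLAIM (what is proved, stated in full; the proofs are below) =====
def Claim_equal_rewrite_urls : Prop := ∀ (html : String), Dom_rewrite_urls html → Pre_rewrite_urls html → Spec_rewrite_urls html (rewrite_urls html)

-- ===== LEMMAS AND PROOFS =====

-- tails of the seven patterns (pattern i = headᵢ :: pvTᵢ)
def pvT1 : List Char := ['r', 'e', 'f', '=', '"', 's', 't', 'y', 'l', 'e', 's', '.', 'c', 's', 's', '"']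
def pvT2 : List Char := ['r', 'c', '=', '"', 'a', 's', 's', 'e', 't', 's', '/', 'l', 'o', 'g', 'o', '.', 'p', 'n', 'g', '"']
def pvT3 : List Char := ['r', 'c', '=', '"', 'a', 's', 's', 'e', 't', 's', '/', 'i', 'm', 'a', 'g', 'e', '1', '.', 'p', 'n', 'g', '"']
def pvT4 : List Char := ['r', 'c', '=', '"', 'a', 's', 's', 'e', 't', 's', '/', 'i', 'm', 'a', 'g', 'e', '2', '.', 'j', 'p', 'g', '"']
def pvT5 : List Char := ['r', 'c', '=', '"', 'a', 's', 's', 'e', 't', 's', '/', 'i', 'm', 'a', 'g', 'e', '3', '.', 'j', 'p', 'g', '"']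
def pvT6 : List Char := ['o', 'n', 't', 'e', 'n', 't', '=', '"', 'a', 's', 's', 'e', 't', 's', '/', 'i', 'm', 'a', 'g', 'e', '1', '.', 'p', 'n', 'g', '"']
def pvT7 : List Char := ['i', 'm', 'a', 'g', 'e', '"', ':', ' ', '"', 'a', 's', 's', 'e', 't', 's', '/', 'i', 'm', 'a', 'g', 'e', '1', '.', 'p', 'n', 'g', '"']

-- the six excluded overlap patterns, on the code-point side
def pvB1 : List Char := pvK1 ++ pvT7
def pvB2 : List Char := pvK2 ++ pvT7
def pvB3 : List Char := pvK3 ++ pvT7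
def pvB4 : List Char := pvK4 ++ pvT7
def pvB5 : List Char := pvK5 ++ pvT7
def pvB6 : List Char := pvK6 ++ pvT7


-- ---- a clean structural form of PySem.Chars.replace for a non-empty pattern (o :: ot) ----
def pvRepS (o : Char) (ot new : List Char) : List Char → List Char
  | [] => []
  | c :: t =>
    if (o :: ot).isPrefixOf (c :: t) then new ++ pvRepS o ot new (t.drop ot.length)
    else c :: pvRepS o ot new t
termination_by s => s.length
decreasing_by all_goals simp

-- A's seven passes, on the code-point side
def pvF (s : List Char) : List Char :=
  pvRepS '"' pvT7 pvR7 (pvRepS 'c' pvT6 pvR6 (pvRepS 's' pvT5 pvR5 (pvRepS 's' pvT4 pvR4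
    (pvRepS 's' pvT3 pvR3 (pvRepS 's' pvT2 pvR2 (pvRepS 'h' pvT1 pvR1 s))))))

lemma pvRepS_nil (o : Char) (ot new : List Char) : pvRepS o ot new [] = [] := by
  simp [pvRepS]

lemma pvRepS_cons_neg (o : Char) (ot new : List Char) (c : Char) (t : List Char)
    (h : ¬ (o :: ot) <+: c :: t) : pvRepS o ot new (c :: t) = c :: pvRepS o ot new t := by
  rw [pvRepS]
  rw [if_neg (by rw [List.isPrefixOf_iff_prefix]; exact h)]

lemma pvRepS_key (o : Char) (ot new u : List Char) :
    pvRepS o ot new ((o :: ot) ++ u) = new ++ pvRepS o ot new u := by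
  rw [show (o :: ot) ++ u = o :: (ot ++ u) from rfl, pvRepS]
  rw [if_pos (by rw [List.isPrefixOf_iff_prefix]
                 exact List.cons_prefix_cons.mpr ⟨rfl, List.prefix_append _ _⟩)]
  rw [List.drop_left]

lemma pvPrefixSplit {k w u : List Char} (h : k <+: w ++ u) :
    k <+: w ∨ (w <+: k ∧ k.drop w.length <+: u) := by
  rcases le_or_gt k.length w.length with hle | hgt
  · exact Or.inl ((List.isPrefix_append_of_length hle).mp h)
  · right
    obtain ⟨z, hz⟩ := h
    have hw : w <+: k := by
      have hwk : w <+: k ++ z := by rw [hz]; exact List.prefix_append w u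
      exact (List.isPrefix_append_of_length (by omega)).mp hwk
    refine ⟨hw, ⟨z, ?_⟩⟩
    have hdz := congrArg (List.drop w.length) hz
    rwa [List.drop_append_of_le_length (by omega), List.drop_left] at hdz

lemma pvNotPreApp (k w u : List Char) (h1 : ¬ k <+: w) (h2 : ¬ w <+: k) : ¬ k <+: w ++ u :=
  fun hc => (pvPrefixSplit hc).elim h1 (fun hw => h2 hw.1)

lemma pvRepS_append (o : Char) (ot new w u : List Char)
    (h : ∀ p, p < w.length → ¬ (o :: ot) <+: (w.drop p ++ u)) :
    pvRepS o ot new (w ++ u) = w ++ pvRepS o ot new u := by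
  induction w with
  | nil => simp
  | cons c w' ih =>
    have h0 : ¬ (o :: ot) <+: (c :: w') ++ u := by simpa using h 0 (by simp)
    rw [show (c :: w') ++ u = c :: (w' ++ u) from rfl,
        pvRepS_cons_neg o ot new c (w' ++ u) h0,
        ih (fun p hp => by simpa using h (p + 1) (by simp; omega))]
    rfl

lemma pvRepS_skip (o : Char) (ot new w u : List Char)
    (H : ∀ p, p < w.length → ¬ w.drop p <+: (o :: ot) ∧ ¬ (o :: ot) <+: w.drop p) :
    pvRepS o ot new (w ++ u) = w ++ pvRepS o ot new u :=
  pvRepS_append o ot new w u (fun p hp hc =>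
    (pvPrefixSplit hc).elim (fun h => (H p hp).2 h) (fun h => (H p hp).1 h.1))

lemma pvRepS_skip_last (o : Char) (ot new w u : List Char)
    (H : ∀ p, p < w.length - 1 → ¬ w.drop p <+: (o :: ot) ∧ ¬ (o :: ot) <+: w.drop p)
    (hlast : w.drop (w.length - 1) = [o]) (hu : ¬ ot <+: u) :
    pvRepS o ot new (w ++ u) = w ++ pvRepS o ot new u := by
  apply pvRepS_append
  intro p hp hc
  rcases lt_or_ge p (w.length - 1) with hp' | hp'
  · exact (pvPrefixSplit hc).elim (fun h => (H p hp').2 h) (fun h => (H p hp').1 h.1)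
  · have hpe : p = w.length - 1 := by omega
    subst hpe
    rw [hlast] at hc
    exact hu (by simpa using hc)

lemma pvRepS_id (o : Char) (ot new : List Char) :
    ∀ (n : Nat) (s : List Char), s.length ≤ n → ¬ (o :: ot) <:+: s → pvRepS o ot new s = s := by
  intro n
  induction n with
  | zero =>
    intro s hs _
    have : s = [] := by cases s <;> simp_all
    subst this; exact pvRepS_nil o ot new
  | succ n ih =>
    intro s hs hinf
    cases s with
    | nil => exact pvRepS_nil o ot new
    | cons c t =>
      have hp : ¬ (o :: ot) <+: c :: t := fun h => hinf h.isInfix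
      rw [pvRepS_cons_neg o ot new c t hp,
          ih t (by simp at hs; omega) (fun h => hinf (h.trans (List.suffix_cons c t).isInfix))]

lemma pvRepS_pres_aux (o : Char) (ot new π : List Char)
    (hπ : ∀ m, m < π.length → ¬ π.drop m <+: new) (hlen : π.length ≤ new.length) :
    ∀ (n : Nat) (u : List Char), u.length ≤ n → ∀ m, ¬ π.drop m <+: u →
      ¬ π.drop m <+: pvRepS o ot new u := by
  intro n
  induction n with
  | zero =>
    intro u hu m h
    have : u = [] := by cases u <;> simp_all
    subst this; rwa [pvRepS_nil]
  | succ n ih =>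
    intro u hu m h
    cases u with
    | nil => rwa [pvRepS_nil]
    | cons c t =>
      have hm : m < π.length := by
        by_contra hm
        apply h
        rw [List.drop_eq_nil_of_le (by omega)]
        exact List.nil_prefix
      by_cases hp : (o :: ot) <+: c :: t
      · rw [pvRepS, if_pos (by rw [List.isPrefixOf_iff_prefix]; exact hp)]
        intro hc
        have h1 : π.drop m <+: new := by
          refine (List.isPrefix_append_of_length ?_).mp hc
          simp [List.length_drop]; omega
        exact hπ m hm h1
      · rw [pvRepS_cons_neg o ot new c t hp]
        intro hc
        rw [List.drop_eq_getElem_cons hm] at hc h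
        rcases List.cons_prefix_cons.mp hc with ⟨he, htl⟩
        have hnt : ¬ π.drop (m + 1) <+: t := fun hx =>
          h (List.cons_prefix_cons.mpr ⟨he, hx⟩)
        exact ih t (by simp at hu; omega) (m + 1) hnt htl

lemma pvRepS_pres0 (o : Char) (ot new π : List Char)
    (hπ : ∀ m, m < π.length → ¬ π.drop m <+: new) (hlen : π.length ≤ new.length)
    (u : List Char) (h : ¬ π <+: u) : ¬ π <+: pvRepS o ot new u := by
  have := pvRepS_pres_aux o ot new π hπ hlen u.length u le_rfl 0 (by simpa using h)
  simpa using this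

lemma pvNotpreStep (kh c : Char) (kt t u' : List Char) (h : ¬ (kh :: kt) <+: c :: t)
    (hp : ¬ kt <+: t → ¬ kt <+: u') : ¬ (kh :: kt) <+: c :: u' := by
  intro hc
  rcases List.cons_prefix_cons.mp hc with ⟨he, htl⟩
  exact hp (fun hx => h (List.cons_prefix_cons.mpr ⟨he, hx⟩)) htl

-- ---- pvRepS is PySem.Chars.replace ----
lemma pvGoEq (o : Char) (ot new : List Char) :
    ∀ (fuel : Nat) (l acc : List Char), l.length ≤ fuel →
      PySem.Chars.replace.go (o :: ot) new fuel l acc = acc.reverse ++ pvRepS o ot new l := by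
  intro fuel
  induction fuel with
  | zero =>
    intro l acc h
    have : l = [] := by cases l <;> simp_all
    subst this
    rw [pvRepS_nil]
    simp [PySem.Chars.replace.go]
  | succ n ih =>
    intro l acc h
    cases l with
    | nil => simp [PySem.Chars.replace.go, pvRepS_nil]
    | cons c t =>
      rw [PySem.Chars.replace.go, pvRepS]
      by_cases hp : (o :: ot).isPrefixOf (c :: t)
      · rw [if_pos hp, if_pos hp]
        rw [show List.drop (o :: ot).length (c :: t) = t.drop ot.length from rfl]
        rw [ih (t.drop ot.length) (new.reverse ++ acc) (by simp at h ⊢; omega)]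
        simp
      · rw [if_neg hp, if_neg hp]
        rw [ih t (c :: acc) (by simp at h; omega)]
        simp

lemma pvReplaceEq (o : Char) (ot new : List Char) (s : List Char) :
    PySem.Chars.replace s (o :: ot) new = pvRepS o ot new s := by
  rw [PySem.Chars.replace]
  simp only [List.isEmpty_cons, if_false, Bool.false_eq_true]
  simpa using pvGoEq o ot new s.length s [] le_rfl

-- ---- bridges between the String-level ports and the code-point level ----
lemma pvStepEq (h o n : String) (oh : Char) (ot : List Char) (ho : o.toList = oh :: ot)
    (nc : List Char) (hn : n.toList = nc) :
    (if PySem.Str.isIn o h then PySem.Str.replace h o n else h).toList =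
      pvRepS oh ot nc h.toList := by
  by_cases hin : PySem.Str.isIn o h
  · rw [if_pos hin, PySem.Str.toList_replace, ho, hn, pvReplaceEq]
  · rw [if_neg hin]
    have hif : ¬ (oh :: ot) <:+: h.toList := by
      rw [← ho]
      intro hinf
      have hb : PySem.Chars.isIn o.toList h.toList = true :=
        (PySem.Chars.isIn_iff_infix _ _).mpr hinf
      simp only [Bool.not_eq_true] at hin
      rw [show PySem.Str.isIn o h = PySem.Chars.isIn o.toList h.toList from rfl] at hin
      rw [hb] at hin
      cases hin
    exact (pvRepS_id oh ot nc h.toList.length h.toList le_rfl hif).symm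

lemma pvAeq (html : String) : (rewrite_urls html).toList = pvF html.toList := by
  simp only [rewrite_urls, replA, List.foldl_cons, List.foldl_nil]
  rw [pvStepEq _ _ _ '\"' pvT7 (by decide) pvR7 (by decide)]
  rw [pvStepEq _ _ _ 'c' pvT6 (by decide) pvR6 (by decide)]
  rw [pvStepEq _ _ _ 's' pvT5 (by decide) pvR5 (by decide)]
  rw [pvStepEq _ _ _ 's' pvT4 (by decide) pvR4 (by decide)]
  rw [pvStepEq _ _ _ 's' pvT3 (by decide) pvR3 (by decide)]
  rw [pvStepEq _ _ _ 's' pvT2 (by decide) pvR2 (by decide)]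
  rw [pvStepEq _ _ _ 'h' pvT1 (by decide) pvR1 (by decide)]
  rfl

lemma pvBeq (html : String) : (rewrite_urls_alt html).toList = pvScan html.toList := by
  simp [rewrite_urls_alt]

lemma pvScan_nil : pvScan [] = [] := by simp [pvScan]

lemma pvScan_key1 (t : List Char) : pvScan (pvK1 ++ t) = pvR1 ++ pvScan t := by
  rw [show pvK1 ++ t = 'h' :: (pvT1 ++ t) from rfl, pvScan]
  rw [if_pos (by rw [List.isPrefixOf_iff_prefix]; exact List.prefix_append pvK1 t)]
  rw [List.drop_left' (by decide : pvT1.length = 16)]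

lemma pvScan_key2 (t : List Char) : pvScan (pvK2 ++ t) = pvR2 ++ pvScan t := by
  rw [show pvK2 ++ t = 's' :: (pvT2 ++ t) from rfl, pvScan]
  rw [if_neg (by rw [List.isPrefixOf_iff_prefix]; exact pvNotPreApp pvK1 pvK2 t (by decide) (by decide))]
  rw [if_pos (by rw [List.isPrefixOf_iff_prefix]; exact List.prefix_append pvK2 t)]
  rw [List.drop_left' (by decide : pvT2.length = 20)]

lemma pvScan_key3 (t : List Char) : pvScan (pvK3 ++ t) = pvR3 ++ pvScan t := by
  rw [show pvK3 ++ t = 's' :: (pvT3 ++ t) from rfl, pvScan]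
  rw [if_neg (by rw [List.isPrefixOf_iff_prefix]; exact pvNotPreApp pvK1 pvK3 t (by decide) (by decide))]
  rw [if_neg (by rw [List.isPrefixOf_iff_prefix]; exact pvNotPreApp pvK2 pvK3 t (by decide) (by decide))]
  rw [if_pos (by rw [List.isPrefixOf_iff_prefix]; exact List.prefix_append pvK3 t)]
  rw [List.drop_left' (by decide : pvT3.length = 22)]

lemma pvScan_key4 (t : List Char) : pvScan (pvK4 ++ t) = pvR4 ++ pvScan t := by
  rw [show pvK4 ++ t = 's' :: (pvT4 ++ t) from rfl, pvScan]
  rw [if_neg (by rw [List.isPrefixOf_iff_prefix]; exact pvNotPreApp pvK1 pvK4 t (by decide) (by decide))]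
  rw [if_neg (by rw [List.isPrefixOf_iff_prefix]; exact pvNotPreApp pvK2 pvK4 t (by decide) (by decide))]
  rw [if_neg (by rw [List.isPrefixOf_iff_prefix]; exact pvNotPreApp pvK3 pvK4 t (by decide) (by decide))]
  rw [if_pos (by rw [List.isPrefixOf_iff_prefix]; exact List.prefix_append pvK4 t)]
  rw [List.drop_left' (by decide : pvT4.length = 22)]

lemma pvScan_key5 (t : List Char) : pvScan (pvK5 ++ t) = pvR5 ++ pvScan t := by
  rw [show pvK5 ++ t = 's' :: (pvT5 ++ t) from rfl, pvScan]
  rw [if_neg (by rw [List.isPrefixOf_iff_prefix]; exact pvNotPreApp pvK1 pvK5 t (by decide) (by decide))]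
  rw [if_neg (by rw [List.isPrefixOf_iff_prefix]; exact pvNotPreApp pvK2 pvK5 t (by decide) (by decide))]
  rw [if_neg (by rw [List.isPrefixOf_iff_prefix]; exact pvNotPreApp pvK3 pvK5 t (by decide) (by decide))]
  rw [if_neg (by rw [List.isPrefixOf_iff_prefix]; exact pvNotPreApp pvK4 pvK5 t (by decide) (by decide))]
  rw [if_pos (by rw [List.isPrefixOf_iff_prefix]; exact List.prefix_append pvK5 t)]
  rw [List.drop_left' (by decide : pvT5.length = 22)]

lemma pvScan_key6 (t : List Char) : pvScan (pvK6 ++ t) = pvR6 ++ pvScan t := by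
  rw [show pvK6 ++ t = 'c' :: (pvT6 ++ t) from rfl, pvScan]
  rw [if_neg (by rw [List.isPrefixOf_iff_prefix]; exact pvNotPreApp pvK1 pvK6 t (by decide) (by decide))]
  rw [if_neg (by rw [List.isPrefixOf_iff_prefix]; exact pvNotPreApp pvK2 pvK6 t (by decide) (by decide))]
  rw [if_neg (by rw [List.isPrefixOf_iff_prefix]; exact pvNotPreApp pvK3 pvK6 t (by decide) (by decide))]
  rw [if_neg (by rw [List.isPrefixOf_iff_prefix]; exact pvNotPreApp pvK4 pvK6 t (by decide) (by decide))]
  rw [if_neg (by rw [List.isPrefixOf_iff_prefix]; exact pvNotPreApp pvK5 pvK6 t (by decide) (by decide))]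
  rw [if_pos (by rw [List.isPrefixOf_iff_prefix]; exact List.prefix_append pvK6 t)]
  rw [List.drop_left' (by decide : pvT6.length = 26)]

lemma pvScan_key7 (t : List Char) : pvScan (pvK7 ++ t) = pvR7 ++ pvScan t := by
  rw [show pvK7 ++ t = '\"' :: (pvT7 ++ t) from rfl, pvScan]
  rw [if_neg (by rw [List.isPrefixOf_iff_prefix]; exact pvNotPreApp pvK1 pvK7 t (by decide) (by decide))]
  rw [if_neg (by rw [List.isPrefixOf_iff_prefix]; exact pvNotPreApp pvK2 pvK7 t (by decide) (by decide))]
  rw [if_neg (by rw [List.isPrefixOf_iff_prefix]; exact pvNotPreApp pvK3 pvK7 t (by decide) (by decide))]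
  rw [if_neg (by rw [List.isPrefixOf_iff_prefix]; exact pvNotPreApp pvK4 pvK7 t (by decide) (by decide))]
  rw [if_neg (by rw [List.isPrefixOf_iff_prefix]; exact pvNotPreApp pvK5 pvK7 t (by decide) (by decide))]
  rw [if_neg (by rw [List.isPrefixOf_iff_prefix]; exact pvNotPreApp pvK6 pvK7 t (by decide) (by decide))]
  rw [if_pos (by rw [List.isPrefixOf_iff_prefix]; exact List.prefix_append pvK7 t)]
  rw [List.drop_left' (by decide : pvT7.length = 27)]

lemma pvScan_cons (c : Char) (t : List Char) (h1 : ¬ pvK1 <+: c :: t) (h2 : ¬ pvK2 <+: c :: t) (h3 : ¬ pvK3 <+: c :: t) (h4 : ¬ pvK4 <+: c :: t) (h5 : ¬ pvK5 <+: c :: t) (h6 : ¬ pvK6 <+: c :: t) (h7 : ¬ pvK7 <+: c :: t) :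
    pvScan (c :: t) = c :: pvScan t := by
  rw [pvScan]
  rw [if_neg (by rw [List.isPrefixOf_iff_prefix]; exact h1)]
  rw [if_neg (by rw [List.isPrefixOf_iff_prefix]; exact h2)]
  rw [if_neg (by rw [List.isPrefixOf_iff_prefix]; exact h3)]
  rw [if_neg (by rw [List.isPrefixOf_iff_prefix]; exact h4)]
  rw [if_neg (by rw [List.isPrefixOf_iff_prefix]; exact h5)]
  rw [if_neg (by rw [List.isPrefixOf_iff_prefix]; exact h6)]
  rw [if_neg (by rw [List.isPrefixOf_iff_prefix]; exact h7)]

lemma pvMain : ∀ (n : Nat) (s : List Char), s.length ≤ n →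
    ¬ pvB1 <:+: s → ¬ pvB2 <:+: s → ¬ pvB3 <:+: s → ¬ pvB4 <:+: s → ¬ pvB5 <:+: s → ¬ pvB6 <:+: s →
    pvF s = pvScan s := by
  intro n
  induction n with
  | zero =>
    intro s hs _ _ _ _ _ _
    have : s = [] := by cases s <;> simp_all
    subst this
    rw [pvScan_nil]; simp [pvF, pvRepS_nil]
  | succ n ih =>
    intro s hs hb1 hb2 hb3 hb4 hb5 hb6
    by_cases h1 : pvK1 <+: s
    · -- pattern 1 matches at the head
      obtain ⟨t, rfl⟩ := h1
      have hts : t <:+: pvK1 ++ t := (List.suffix_append pvK1 t).isInfix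
      have hlen : t.length ≤ n := by
        rw [List.length_append, (by decide : pvK1.length = 17)] at hs; omega
      rw [pvScan_key1]
      unfold pvF
      rw [show pvK1 = 'h' :: pvT1 from rfl, pvRepS_key]
      have hnt : ¬ pvT7 <+: t := by
        intro hp
        obtain ⟨z, hz⟩ := hp
        exact hb1 ⟨[], z, by simp [pvB1, ← hz]⟩
      have hc1 : ¬ pvT7 <+: pvRepS 'h' pvT1 pvR1 t :=
        pvRepS_pres0 'h' pvT1 pvR1 pvT7 (by decide) (by decide) _ hnt
      have hc2 : ¬ pvT7 <+: pvRepS 's' pvT2 pvR2 _ :=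
        pvRepS_pres0 's' pvT2 pvR2 pvT7 (by decide) (by decide) _ hc1
      have hc3 : ¬ pvT7 <+: pvRepS 's' pvT3 pvR3 _ :=
        pvRepS_pres0 's' pvT3 pvR3 pvT7 (by decide) (by decide) _ hc2
      have hc4 : ¬ pvT7 <+: pvRepS 's' pvT4 pvR4 _ :=
        pvRepS_pres0 's' pvT4 pvR4 pvT7 (by decide) (by decide) _ hc3
      have hc5 : ¬ pvT7 <+: pvRepS 's' pvT5 pvR5 _ :=
        pvRepS_pres0 's' pvT5 pvR5 pvT7 (by decide) (by decide) _ hc4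
      have hc6 : ¬ pvT7 <+: pvRepS 'c' pvT6 pvR6 _ :=
        pvRepS_pres0 'c' pvT6 pvR6 pvT7 (by decide) (by decide) _ hc5
      rw [pvRepS_skip 's' pvT2 pvR2 pvR1 _ (by decide)]
      rw [pvRepS_skip 's' pvT3 pvR3 pvR1 _ (by decide)]
      rw [pvRepS_skip 's' pvT4 pvR4 pvR1 _ (by decide)]
      rw [pvRepS_skip 's' pvT5 pvR5 pvR1 _ (by decide)]
      rw [pvRepS_skip 'c' pvT6 pvR6 pvR1 _ (by decide)]
      rw [pvRepS_skip_last '\"' pvT7 pvR7 pvR1 _ (by decide) (by decide) hc6]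
      exact congrArg (pvR1 ++ ·) (ih t hlen (fun hx => hb1 (hx.trans hts)) (fun hx => hb2 (hx.trans hts)) (fun hx => hb3 (hx.trans hts)) (fun hx => hb4 (hx.trans hts)) (fun hx => hb5 (hx.trans hts)) (fun hx => hb6 (hx.trans hts)))
    by_cases h2 : pvK2 <+: s
    · -- pattern 2 matches at the head
      obtain ⟨t, rfl⟩ := h2
      have hts : t <:+: pvK2 ++ t := (List.suffix_append pvK2 t).isInfix
      have hlen : t.length ≤ n := by
        rw [List.length_append, (by decide : pvK2.length = 21)] at hs; omega
      rw [pvScan_key2]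
      unfold pvF
      rw [pvRepS_skip 'h' pvT1 pvR1 pvK2 _ (by decide)]
      rw [show pvK2 = 's' :: pvT2 from rfl, pvRepS_key]
      have hnt : ¬ pvT7 <+: t := by
        intro hp
        obtain ⟨z, hz⟩ := hp
        exact hb2 ⟨[], z, by simp [pvB2, ← hz]⟩
      have hc1 : ¬ pvT7 <+: pvRepS 'h' pvT1 pvR1 t :=
        pvRepS_pres0 'h' pvT1 pvR1 pvT7 (by decide) (by decide) _ hnt
      have hc2 : ¬ pvT7 <+: pvRepS 's' pvT2 pvR2 _ :=
        pvRepS_pres0 's' pvT2 pvR2 pvT7 (by decide) (by decide) _ hc1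
      have hc3 : ¬ pvT7 <+: pvRepS 's' pvT3 pvR3 _ :=
        pvRepS_pres0 's' pvT3 pvR3 pvT7 (by decide) (by decide) _ hc2
      have hc4 : ¬ pvT7 <+: pvRepS 's' pvT4 pvR4 _ :=
        pvRepS_pres0 's' pvT4 pvR4 pvT7 (by decide) (by decide) _ hc3
      have hc5 : ¬ pvT7 <+: pvRepS 's' pvT5 pvR5 _ :=
        pvRepS_pres0 's' pvT5 pvR5 pvT7 (by decide) (by decide) _ hc4
      have hc6 : ¬ pvT7 <+: pvRepS 'c' pvT6 pvR6 _ :=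
        pvRepS_pres0 'c' pvT6 pvR6 pvT7 (by decide) (by decide) _ hc5
      rw [pvRepS_skip 's' pvT3 pvR3 pvR2 _ (by decide)]
      rw [pvRepS_skip 's' pvT4 pvR4 pvR2 _ (by decide)]
      rw [pvRepS_skip 's' pvT5 pvR5 pvR2 _ (by decide)]
      rw [pvRepS_skip 'c' pvT6 pvR6 pvR2 _ (by decide)]
      rw [pvRepS_skip_last '\"' pvT7 pvR7 pvR2 _ (by decide) (by decide) hc6]
      exact congrArg (pvR2 ++ ·) (ih t hlen (fun hx => hb1 (hx.trans hts)) (fun hx => hb2 (hx.trans hts)) (fun hx => hb3 (hx.trans hts)) (fun hx => hb4 (hx.trans hts)) (fun hx => hb5 (hx.trans hts)) (fun hx => hb6 (hx.trans hts)))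
    by_cases h3 : pvK3 <+: s
    · -- pattern 3 matches at the head
      obtain ⟨t, rfl⟩ := h3
      have hts : t <:+: pvK3 ++ t := (List.suffix_append pvK3 t).isInfix
      have hlen : t.length ≤ n := by
        rw [List.length_append, (by decide : pvK3.length = 23)] at hs; omega
      rw [pvScan_key3]
      unfold pvF
      rw [pvRepS_skip 'h' pvT1 pvR1 pvK3 _ (by decide)]
      rw [pvRepS_skip 's' pvT2 pvR2 pvK3 _ (by decide)]
      rw [show pvK3 = 's' :: pvT3 from rfl, pvRepS_key]
      have hnt : ¬ pvT7 <+: t := by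
        intro hp
        obtain ⟨z, hz⟩ := hp
        exact hb3 ⟨[], z, by simp [pvB3, ← hz]⟩
      have hc1 : ¬ pvT7 <+: pvRepS 'h' pvT1 pvR1 t :=
        pvRepS_pres0 'h' pvT1 pvR1 pvT7 (by decide) (by decide) _ hnt
      have hc2 : ¬ pvT7 <+: pvRepS 's' pvT2 pvR2 _ :=
        pvRepS_pres0 's' pvT2 pvR2 pvT7 (by decide) (by decide) _ hc1
      have hc3 : ¬ pvT7 <+: pvRepS 's' pvT3 pvR3 _ :=
        pvRepS_pres0 's' pvT3 pvR3 pvT7 (by decide) (by decide) _ hc2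
      have hc4 : ¬ pvT7 <+: pvRepS 's' pvT4 pvR4 _ :=
        pvRepS_pres0 's' pvT4 pvR4 pvT7 (by decide) (by decide) _ hc3
      have hc5 : ¬ pvT7 <+: pvRepS 's' pvT5 pvR5 _ :=
        pvRepS_pres0 's' pvT5 pvR5 pvT7 (by decide) (by decide) _ hc4
      have hc6 : ¬ pvT7 <+: pvRepS 'c' pvT6 pvR6 _ :=
        pvRepS_pres0 'c' pvT6 pvR6 pvT7 (by decide) (by decide) _ hc5
      rw [pvRepS_skip 's' pvT4 pvR4 pvR3 _ (by decide)]
      rw [pvRepS_skip 's' pvT5 pvR5 pvR3 _ (by decide)]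
      rw [pvRepS_skip 'c' pvT6 pvR6 pvR3 _ (by decide)]
      rw [pvRepS_skip_last '\"' pvT7 pvR7 pvR3 _ (by decide) (by decide) hc6]
      exact congrArg (pvR3 ++ ·) (ih t hlen (fun hx => hb1 (hx.trans hts)) (fun hx => hb2 (hx.trans hts)) (fun hx => hb3 (hx.trans hts)) (fun hx => hb4 (hx.trans hts)) (fun hx => hb5 (hx.trans hts)) (fun hx => hb6 (hx.trans hts)))
    by_cases h4 : pvK4 <+: s
    · -- pattern 4 matches at the head
      obtain ⟨t, rfl⟩ := h4
      have hts : t <:+: pvK4 ++ t := (List.suffix_append pvK4 t).isInfix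
      have hlen : t.length ≤ n := by
        rw [List.length_append, (by decide : pvK4.length = 23)] at hs; omega
      rw [pvScan_key4]
      unfold pvF
      rw [pvRepS_skip 'h' pvT1 pvR1 pvK4 _ (by decide)]
      rw [pvRepS_skip 's' pvT2 pvR2 pvK4 _ (by decide)]
      rw [pvRepS_skip 's' pvT3 pvR3 pvK4 _ (by decide)]
      rw [show pvK4 = 's' :: pvT4 from rfl, pvRepS_key]
      have hnt : ¬ pvT7 <+: t := by
        intro hp
        obtain ⟨z, hz⟩ := hp
        exact hb4 ⟨[], z, by simp [pvB4, ← hz]⟩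
      have hc1 : ¬ pvT7 <+: pvRepS 'h' pvT1 pvR1 t :=
        pvRepS_pres0 'h' pvT1 pvR1 pvT7 (by decide) (by decide) _ hnt
      have hc2 : ¬ pvT7 <+: pvRepS 's' pvT2 pvR2 _ :=
        pvRepS_pres0 's' pvT2 pvR2 pvT7 (by decide) (by decide) _ hc1
      have hc3 : ¬ pvT7 <+: pvRepS 's' pvT3 pvR3 _ :=
        pvRepS_pres0 's' pvT3 pvR3 pvT7 (by decide) (by decide) _ hc2
      have hc4 : ¬ pvT7 <+: pvRepS 's' pvT4 pvR4 _ :=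
        pvRepS_pres0 's' pvT4 pvR4 pvT7 (by decide) (by decide) _ hc3
      have hc5 : ¬ pvT7 <+: pvRepS 's' pvT5 pvR5 _ :=
        pvRepS_pres0 's' pvT5 pvR5 pvT7 (by decide) (by decide) _ hc4
      have hc6 : ¬ pvT7 <+: pvRepS 'c' pvT6 pvR6 _ :=
        pvRepS_pres0 'c' pvT6 pvR6 pvT7 (by decide) (by decide) _ hc5
      rw [pvRepS_skip 's' pvT5 pvR5 pvR4 _ (by decide)]
      rw [pvRepS_skip 'c' pvT6 pvR6 pvR4 _ (by decide)]
      rw [pvRepS_skip_last '\"' pvT7 pvR7 pvR4 _ (by decide) (by decide) hc6]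
      exact congrArg (pvR4 ++ ·) (ih t hlen (fun hx => hb1 (hx.trans hts)) (fun hx => hb2 (hx.trans hts)) (fun hx => hb3 (hx.trans hts)) (fun hx => hb4 (hx.trans hts)) (fun hx => hb5 (hx.trans hts)) (fun hx => hb6 (hx.trans hts)))
    by_cases h5 : pvK5 <+: s
    · -- pattern 5 matches at the head
      obtain ⟨t, rfl⟩ := h5
      have hts : t <:+: pvK5 ++ t := (List.suffix_append pvK5 t).isInfix
      have hlen : t.length ≤ n := by
        rw [List.length_append, (by decide : pvK5.length = 23)] at hs; omega
      rw [pvScan_key5]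
      unfold pvF
      rw [pvRepS_skip 'h' pvT1 pvR1 pvK5 _ (by decide)]
      rw [pvRepS_skip 's' pvT2 pvR2 pvK5 _ (by decide)]
      rw [pvRepS_skip 's' pvT3 pvR3 pvK5 _ (by decide)]
      rw [pvRepS_skip 's' pvT4 pvR4 pvK5 _ (by decide)]
      rw [show pvK5 = 's' :: pvT5 from rfl, pvRepS_key]
      have hnt : ¬ pvT7 <+: t := by
        intro hp
        obtain ⟨z, hz⟩ := hp
        exact hb5 ⟨[], z, by simp [pvB5, ← hz]⟩
      have hc1 : ¬ pvT7 <+: pvRepS 'h' pvT1 pvR1 t :=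
        pvRepS_pres0 'h' pvT1 pvR1 pvT7 (by decide) (by decide) _ hnt
      have hc2 : ¬ pvT7 <+: pvRepS 's' pvT2 pvR2 _ :=
        pvRepS_pres0 's' pvT2 pvR2 pvT7 (by decide) (by decide) _ hc1
      have hc3 : ¬ pvT7 <+: pvRepS 's' pvT3 pvR3 _ :=
        pvRepS_pres0 's' pvT3 pvR3 pvT7 (by decide) (by decide) _ hc2
      have hc4 : ¬ pvT7 <+: pvRepS 's' pvT4 pvR4 _ :=
        pvRepS_pres0 's' pvT4 pvR4 pvT7 (by decide) (by decide) _ hc3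
      have hc5 : ¬ pvT7 <+: pvRepS 's' pvT5 pvR5 _ :=
        pvRepS_pres0 's' pvT5 pvR5 pvT7 (by decide) (by decide) _ hc4
      have hc6 : ¬ pvT7 <+: pvRepS 'c' pvT6 pvR6 _ :=
        pvRepS_pres0 'c' pvT6 pvR6 pvT7 (by decide) (by decide) _ hc5
      rw [pvRepS_skip 'c' pvT6 pvR6 pvR5 _ (by decide)]
      rw [pvRepS_skip_last '\"' pvT7 pvR7 pvR5 _ (by decide) (by decide) hc6]
      exact congrArg (pvR5 ++ ·) (ih t hlen (fun hx => hb1 (hx.trans hts)) (fun hx => hb2 (hx.trans hts)) (fun hx => hb3 (hx.trans hts)) (fun hx => hb4 (hx.trans hts)) (fun hx => hb5 (hx.trans hts)) (fun hx => hb6 (hx.trans hts)))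
    by_cases h6 : pvK6 <+: s
    · -- pattern 6 matches at the head
      obtain ⟨t, rfl⟩ := h6
      have hts : t <:+: pvK6 ++ t := (List.suffix_append pvK6 t).isInfix
      have hlen : t.length ≤ n := by
        rw [List.length_append, (by decide : pvK6.length = 27)] at hs; omega
      rw [pvScan_key6]
      unfold pvF
      rw [pvRepS_skip 'h' pvT1 pvR1 pvK6 _ (by decide)]
      rw [pvRepS_skip 's' pvT2 pvR2 pvK6 _ (by decide)]
      rw [pvRepS_skip 's' pvT3 pvR3 pvK6 _ (by decide)]
      rw [pvRepS_skip 's' pvT4 pvR4 pvK6 _ (by decide)]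
      rw [pvRepS_skip 's' pvT5 pvR5 pvK6 _ (by decide)]
      rw [show pvK6 = 'c' :: pvT6 from rfl, pvRepS_key]
      have hnt : ¬ pvT7 <+: t := by
        intro hp
        obtain ⟨z, hz⟩ := hp
        exact hb6 ⟨[], z, by simp [pvB6, ← hz]⟩
      have hc1 : ¬ pvT7 <+: pvRepS 'h' pvT1 pvR1 t :=
        pvRepS_pres0 'h' pvT1 pvR1 pvT7 (by decide) (by decide) _ hnt
      have hc2 : ¬ pvT7 <+: pvRepS 's' pvT2 pvR2 _ :=
        pvRepS_pres0 's' pvT2 pvR2 pvT7 (by decide) (by decide) _ hc1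
      have hc3 : ¬ pvT7 <+: pvRepS 's' pvT3 pvR3 _ :=
        pvRepS_pres0 's' pvT3 pvR3 pvT7 (by decide) (by decide) _ hc2
      have hc4 : ¬ pvT7 <+: pvRepS 's' pvT4 pvR4 _ :=
        pvRepS_pres0 's' pvT4 pvR4 pvT7 (by decide) (by decide) _ hc3
      have hc5 : ¬ pvT7 <+: pvRepS 's' pvT5 pvR5 _ :=
        pvRepS_pres0 's' pvT5 pvR5 pvT7 (by decide) (by decide) _ hc4
      have hc6 : ¬ pvT7 <+: pvRepS 'c' pvT6 pvR6 _ :=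
        pvRepS_pres0 'c' pvT6 pvR6 pvT7 (by decide) (by decide) _ hc5
      rw [pvRepS_skip_last '\"' pvT7 pvR7 pvR6 _ (by decide) (by decide) hc6]
      exact congrArg (pvR6 ++ ·) (ih t hlen (fun hx => hb1 (hx.trans hts)) (fun hx => hb2 (hx.trans hts)) (fun hx => hb3 (hx.trans hts)) (fun hx => hb4 (hx.trans hts)) (fun hx => hb5 (hx.trans hts)) (fun hx => hb6 (hx.trans hts)))
    by_cases h7 : pvK7 <+: s
    · -- pattern 7 matches at the head
      obtain ⟨t, rfl⟩ := h7
      have hts : t <:+: pvK7 ++ t := (List.suffix_append pvK7 t).isInfix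
      have hlen : t.length ≤ n := by
        rw [List.length_append, (by decide : pvK7.length = 28)] at hs; omega
      rw [pvScan_key7]
      unfold pvF
      rw [pvRepS_skip 'h' pvT1 pvR1 pvK7 _ (by decide)]
      rw [pvRepS_skip 's' pvT2 pvR2 pvK7 _ (by decide)]
      rw [pvRepS_skip 's' pvT3 pvR3 pvK7 _ (by decide)]
      rw [pvRepS_skip 's' pvT4 pvR4 pvK7 _ (by decide)]
      rw [pvRepS_skip 's' pvT5 pvR5 pvK7 _ (by decide)]
      rw [pvRepS_skip 'c' pvT6 pvR6 pvK7 _ (by decide)]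
      rw [show pvK7 = '\"' :: pvT7 from rfl, pvRepS_key]
      exact congrArg (pvR7 ++ ·) (ih t hlen (fun hx => hb1 (hx.trans hts)) (fun hx => hb2 (hx.trans hts)) (fun hx => hb3 (hx.trans hts)) (fun hx => hb4 (hx.trans hts)) (fun hx => hb5 (hx.trans hts)) (fun hx => hb6 (hx.trans hts)))
    cases s with
    | nil => rw [pvScan_nil]; simp [pvF, pvRepS_nil]
    | cons c t =>
      have hlen : t.length ≤ n := by simp at hs; omega
      have hts : t <:+: c :: t := (List.suffix_cons c t).isInfix
      rw [pvScan_cons c t h1 h2 h3 h4 h5 h6 h7]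
      unfold pvF
      rw [pvRepS_cons_neg 'h' pvT1 pvR1 c t h1]
      have h2' : ¬ ('s' :: pvT2) <+: c :: (pvRepS 'h' pvT1 pvR1 t) :=
        pvNotpreStep 's' c pvT2 t _ h2 (fun hn => pvRepS_pres0 'h' pvT1 pvR1 pvT2 (by decide) (by decide) _ (hn))
      rw [pvRepS_cons_neg 's' pvT2 pvR2 c _ h2']
      have h3' : ¬ ('s' :: pvT3) <+: c :: (pvRepS 's' pvT2 pvR2 _) :=
        pvNotpreStep 's' c pvT3 t _ h3 (fun hn => pvRepS_pres0 's' pvT2 pvR2 pvT3 (by decide) (by decide) _ (pvRepS_pres0 'h' pvT1 pvR1 pvT3 (by decide) (by decide) _ (hn)))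
      rw [pvRepS_cons_neg 's' pvT3 pvR3 c _ h3']
      have h4' : ¬ ('s' :: pvT4) <+: c :: (pvRepS 's' pvT3 pvR3 _) :=
        pvNotpreStep 's' c pvT4 t _ h4 (fun hn => pvRepS_pres0 's' pvT3 pvR3 pvT4 (by decide) (by decide) _ (pvRepS_pres0 's' pvT2 pvR2 pvT4 (by decide) (by decide) _ (pvRepS_pres0 'h' pvT1 pvR1 pvT4 (by decide) (by decide) _ (hn))))
      rw [pvRepS_cons_neg 's' pvT4 pvR4 c _ h4']
      have h5' : ¬ ('s' :: pvT5) <+: c :: (pvRepS 's' pvT4 pvR4 _) :=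
        pvNotpreStep 's' c pvT5 t _ h5 (fun hn => pvRepS_pres0 's' pvT4 pvR4 pvT5 (by decide) (by decide) _ (pvRepS_pres0 's' pvT3 pvR3 pvT5 (by decide) (by decide) _ (pvRepS_pres0 's' pvT2 pvR2 pvT5 (by decide) (by decide) _ (pvRepS_pres0 'h' pvT1 pvR1 pvT5 (by decide) (by decide) _ (hn)))))
      rw [pvRepS_cons_neg 's' pvT5 pvR5 c _ h5']
      have h6' : ¬ ('c' :: pvT6) <+: c :: (pvRepS 's' pvT5 pvR5 _) :=
        pvNotpreStep 'c' c pvT6 t _ h6 (fun hn => pvRepS_pres0 's' pvT5 pvR5 pvT6 (by decide) (by decide) _ (pvRepS_pres0 's' pvT4 pvR4 pvT6 (by decide) (by decide) _ (pvRepS_pres0 's' pvT3 pvR3 pvT6 (by decide) (by decide) _ (pvRepS_pres0 's' pvT2 pvR2 pvT6 (by decide) (by decide) _ (pvRepS_pres0 'h' pvT1 pvR1 pvT6 (by decide) (by decide) _ (hn))))))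
      rw [pvRepS_cons_neg 'c' pvT6 pvR6 c _ h6']
      have h7' : ¬ ('\"' :: pvT7) <+: c :: (pvRepS 'c' pvT6 pvR6 _) :=
        pvNotpreStep '\"' c pvT7 t _ h7 (fun hn => pvRepS_pres0 'c' pvT6 pvR6 pvT7 (by decide) (by decide) _ (pvRepS_pres0 's' pvT5 pvR5 pvT7 (by decide) (by decide) _ (pvRepS_pres0 's' pvT4 pvR4 pvT7 (by decide) (by decide) _ (pvRepS_pres0 's' pvT3 pvR3 pvT7 (by decide) (by decide) _ (pvRepS_pres0 's' pvT2 pvR2 pvT7 (by decide) (by decide) _ (pvRepS_pres0 'h' pvT1 pvR1 pvT7 (by decide) (by decide) _ (hn)))))))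
      rw [pvRepS_cons_neg '\"' pvT7 pvR7 c _ h7']
      exact congrArg (c :: ·) (ih t hlen (fun hx => hb1 (hx.trans hts)) (fun hx => hb2 (hx.trans hts)) (fun hx => hb3 (hx.trans hts)) (fun hx => hb4 (hx.trans hts)) (fun hx => hb5 (hx.trans hts)) (fun hx => hb6 (hx.trans hts)))

-- ===== VERDICT (by name: the statement is the Claim_ definition above) =====
theorem rewrite_urls_spec : Claim_equal_rewrite_urls := by
  intro html _ hpre
  unfold Spec_rewrite_urls
  apply String.toList_inj.mp
  rw [pvAeq, pvBeq]
  have conv : ∀ p : String, PySem.Str.isIn p html = false → ¬ p.toList <:+: html.toList := by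
    intro p hf hinf
    have hb : PySem.Chars.isIn p.toList html.toList = true :=
      (PySem.Chars.isIn_iff_infix _ _).mpr hinf
    rw [show PySem.Str.isIn p html = PySem.Chars.isIn p.toList html.toList from rfl, hb] at hf
    cases hf
  refine pvMain html.toList.length _ le_rfl ?_ ?_ ?_ ?_ ?_ ?_
  · exact (by decide : ("href=\"styles.css\"image\": \"assets/image1.png\"" : String).toList = pvB1) ▸ conv _ (hpre _ (by simp [pvBad]))
  · exact (by decide : ("src=\"assets/logo.png\"image\": \"assets/image1.png\"" : String).toList = pvB2) ▸ conv _ (hpre _ (by simp [pvBad]))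
  · exact (by decide : ("src=\"assets/image1.png\"image\": \"assets/image1.png\"" : String).toList = pvB3) ▸ conv _ (hpre _ (by simp [pvBad]))
  · exact (by decide : ("src=\"assets/image2.jpg\"image\": \"assets/image1.png\"" : String).toList = pvB4) ▸ conv _ (hpre _ (by simp [pvBad]))
  · exact (by decide : ("src=\"assets/image3.jpg\"image\": \"assets/image1.png\"" : String).toList = pvB5) ▸ conv _ (hpre _ (by simp [pvBad]))
  · exact (by decide : ("content=\"assets/image1.png\"image\": \"assets/image1.png\"" : String).toList = pvB6) ▸ conv _ (hpre _ (by simp [pvBad]))
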